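-- pv_equiv track=rewrite | github.com/wujiani/EventLogsGenerator | scripts/log_gen_seq_utils.py | get_transition
-- ===== SOURCE A (Python) =====
-- def get_transition(input_trans):
--     transition = {}
--     for each in input_trans:
--         prefix = each[:-1]
--         prefix = tuple(prefix)
--         tmp = transition.get(prefix, [])
--         tmp.append(each[-1])
--         transition[prefix] = tmp
--     return transition
-- ===== SOURCE B (Python) =====
-- def get_transition(input_trans):
--     # collect distinct prefixes in first-occurrence order, then gather
--     # each prefix's last elements with one comprehension per prefix
--     prefixes = []
--     for each in input_trans:
--         p = tuple(each[:-1])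
--         if p not in prefixes:
--             prefixes.append(p)
--     return {p: [each[-1] for each in input_trans if tuple(each[:-1]) == p]
--             for p in prefixes}
-- ===== Notes on version B (the rewrite author's own statement) =====
-- stated objective: alternative
-- what changed: Replaces the single-pass dict-accumulation with a two-phase group-by: first dedup the prefixes in first-occurrence order, then build each group's suffix list by a filtering comprehension over the whole input.
import Mathlib
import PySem

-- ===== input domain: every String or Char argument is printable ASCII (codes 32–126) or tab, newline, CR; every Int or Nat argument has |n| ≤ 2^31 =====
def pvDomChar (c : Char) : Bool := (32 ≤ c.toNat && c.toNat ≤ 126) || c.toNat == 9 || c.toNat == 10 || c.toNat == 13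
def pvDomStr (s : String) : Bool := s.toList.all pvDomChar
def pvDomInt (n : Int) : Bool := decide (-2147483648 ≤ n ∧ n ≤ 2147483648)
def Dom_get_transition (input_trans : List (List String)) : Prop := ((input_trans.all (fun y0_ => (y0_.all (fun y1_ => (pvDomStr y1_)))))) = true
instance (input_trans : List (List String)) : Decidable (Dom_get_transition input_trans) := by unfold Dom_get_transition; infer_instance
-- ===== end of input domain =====

-- B replaces A's single-pass dict accumulation by a two-phase group-by
-- (dedup the prefixes, then one filtering pass per pfx); objective: alternative.

-- ===== PORT A =====
def get_transition (input_trans : List (List String)) : List (List String × List String) :=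
  (input_trans.foldl (fun transition each =>
      let pfx := PySem.List.slice each none (some (-1))
      let tmp := transition.getD pfx []
      let tmp := tmp ++ [PySem.List.pyGetD each (-1) ""]
      transition.insert pfx tmp)
    PySem.Dict.empty).items

-- ===== PORT B =====
def get_transition_alt (input_trans : List (List String)) : List (List String × List String) :=
  let prefixes := input_trans.foldl (fun acc each =>
      let p := each.dropLast
      if p ∈ acc then acc else acc ++ [p]) []
  prefixes.map (fun p =>
    (p, (input_trans.filter (fun each => each.dropLast == p)).map
          (fun each => PySem.List.pyGetD each (-1) "")))

-- ===== PRECONDITION & SPEC =====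
-- Pre_ excludes inputs containing an empty inner list: there A's each[-1] raises IndexError (B raises too).
def Pre_get_transition (input_trans : List (List String)) : Prop :=
  ∀ each ∈ input_trans, each ≠ []
instance (input_trans : List (List String)) : Decidable (Pre_get_transition input_trans) := by
  unfold Pre_get_transition; infer_instance

def pvWitness_get_transition : List (List String) := [["a", "b"], ["a", "c"], ["x"]]

def Spec_get_transition (input_trans : List (List String)) (out : List (List String × List String)) : Prop := out = get_transition_alt input_trans
instance (input_trans : List (List String)) (out : List (List String × List String)) : Decidable (Spec_get_transition input_trans out) := by unfold Spec_get_transition; infer_instance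

-- ===== CLAIM (what is proved, stated in full; the proofs are below) =====
def Claim_equal_get_transition : Prop := ∀ (input_trans : List (List String)), Dom_get_transition input_trans → Pre_get_transition input_trans → Spec_get_transition input_trans (get_transition input_trans)

-- ===== LEMMAS AND PROOFS =====

-- A's per-element update "tmp = d.get(p, []); tmp.append(last); d[p] = tmp" is Dict.modify.
theorem pvStepA_eq_modify (d : PySem.Dict (List String) (List String)) (each : List String) :
    d.insert (PySem.List.slice each none (some (-1)))
      (d.getD (PySem.List.slice each none (some (-1))) [] ++ [PySem.List.pyGetD each (-1) ""]) =
    d.modify each.dropLast [] (· ++ [PySem.List.pyGetD each (-1) ""]) := by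
  rw [PySem.List.slice_to_neg_one]
  rfl

theorem pvDictA_eq (input_trans : List (List String)) :
    (input_trans.foldl (fun transition each =>
        let pfx := PySem.List.slice each none (some (-1))
        let tmp := transition.getD pfx []
        let tmp := tmp ++ [PySem.List.pyGetD each (-1) ""]
        transition.insert pfx tmp) PySem.Dict.empty) =
    ((input_trans.map (fun e => (e.dropLast, PySem.List.pyGetD e (-1) ""))).foldl
        (fun d p => d.modify p.1 [] (· ++ [p.2])) PySem.Dict.empty) := by
  rw [List.foldl_map]
  apply PySem.List.foldl_congr_mem
  intro d e _
  simpa using pvStepA_eq_modify d e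

-- ===== VERDICT (by name: the statement is the Claim_ definition above) =====
theorem get_transition_spec : Claim_equal_get_transition := by
  intro input_trans _ _
  unfold Spec_get_transition get_transition get_transition_alt
  rw [pvDictA_eq]
  set l := input_trans.map (fun e => (e.dropLast, PySem.List.pyGetD e (-1) "")) with hl
  set d := l.foldl (fun d p => d.modify p.1 [] (· ++ [p.2])) PySem.Dict.empty with hd
  have hnd : d.keys.Nodup := by
    rw [hd]
    exact PySem.Dict.nodup_keys_foldl_modify_key l Prod.fst [] (fun d p => (· ++ [p.2])) _
      (by simp)
  have hkeys : d.keys = PySem.Set.ofList (input_trans.map (fun e => e.dropLast)) := by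
    rw [hd]
    have := PySem.Dict.keys_foldl_modify_key l Prod.fst [] (fun d p => (· ++ [p.2]))
      PySem.Dict.empty
    rw [this]
    simp [PySem.Dict.keys_empty, PySem.Set.update_nil_left, hl, List.map_map]
    rfl
  have hgetD : ∀ p, d.getD p [] =
      (input_trans.filter (fun each => each.dropLast == p)).map
        (fun each => PySem.List.pyGetD each (-1) "") := by
    intro p
    rw [hd, PySem.Dict.getD_foldl_modify_append]
    simp [PySem.Dict.getD_empty, hl, List.filter_map, Function.comp_def]
  have hprefB : input_trans.foldl (fun acc each =>
      let p := each.dropLast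
      if p ∈ acc then acc else acc ++ [p]) [] =
      PySem.Set.ofList (input_trans.map (fun e => e.dropLast)) := by
    rw [← PySem.Set.update_nil_left, PySem.Set.update_map_eq_foldl_add]
    apply PySem.List.foldl_congr_mem
    intro acc e _
    simp [PySem.Set.add_eq_ite]
  rw [PySem.Dict.items_eq_map_keys d hnd [], hkeys, hprefB]
  apply List.map_congr_left
  intro p _
  simp [hgetD p]
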